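-- pv_equiv track=rewrite | github.com/namin/argument-debugger | argsem.py | _F
-- ===== SOURCE A (Python) =====
-- from typing import Dict, List, Set, Tuple, FrozenSet, Optional
--
-- def _F(atoms: List[str], attacks: Set[Tuple[str,str]], S: Set[str]) -> Set[str]:
--     atk = {a:set() for a in atoms}
--     for (u,v) in attacks:
--         if v in atk: atk[v].add(u)
--     defended = set()
--     for a in atoms:
--         ok = True
--         for b in atk[a]:
--             if not any((c,b) in attacks for c in S):
--                 ok = False; break
--         if ok:
--             defended.add(a)
--     return defended
-- ===== SOURCE B (Python) =====
-- def _F(atoms, attacks, S):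
--     attacked_by_S = {v for (c, v) in attacks if c in S}
--     undefended = {a for (b, a) in attacks if b not in attacked_by_S}
--     return set(atoms) - undefended
-- ===== Notes on version B (the rewrite author's own statement) =====
-- stated objective: faster
-- what changed: Replaced the per-atom attacker-index plus nested any-over-S check by two flat passes over the attack edges (build the set of arguments attacked by S, then the set of undefended targets) and a final set difference set(atoms) - undefended.
import Mathlib
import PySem

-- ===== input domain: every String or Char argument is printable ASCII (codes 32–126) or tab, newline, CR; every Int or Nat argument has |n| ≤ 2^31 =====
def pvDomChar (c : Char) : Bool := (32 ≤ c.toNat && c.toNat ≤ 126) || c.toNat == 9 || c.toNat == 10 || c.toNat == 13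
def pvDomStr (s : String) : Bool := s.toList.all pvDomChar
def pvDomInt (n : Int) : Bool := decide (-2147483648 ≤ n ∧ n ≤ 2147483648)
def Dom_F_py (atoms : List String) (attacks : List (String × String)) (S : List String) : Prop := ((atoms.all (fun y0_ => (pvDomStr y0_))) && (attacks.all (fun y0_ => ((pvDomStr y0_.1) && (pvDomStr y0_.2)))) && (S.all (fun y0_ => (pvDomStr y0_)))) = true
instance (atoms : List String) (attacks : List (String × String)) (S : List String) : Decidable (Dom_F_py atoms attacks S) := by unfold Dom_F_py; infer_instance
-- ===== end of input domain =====

-- B replaces A's attacker index and nested per-atom check by two flat edge passes and a set difference (faster).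

-- ===== PORT A =====
-- atk = {a: set() for a in atoms}; then for (u,v) in attacks: if v in atk: atk[v].add(u)
def F_py (atoms : List String) (attacks : List (String × String)) (S : List String) : List String :=
  let atk0 : PySem.Dict String (PySem.Set String) :=
    atoms.foldl (fun d a => d.insert a PySem.Set.empty) PySem.Dict.empty
  let atk : PySem.Dict String (PySem.Set String) :=
    attacks.foldl (fun d uv =>
      if d.contains uv.2 then d.modify uv.2 PySem.Set.empty (fun s => PySem.Set.add s uv.1) else d) atk0
  -- defended = set(); for a in atoms: ok = all attackers b of a are counter-attacked by some c in S; if ok: defended.add(a)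
  let defended : PySem.Set String :=
    atoms.foldl (fun dfd a =>
      let ok := (atk.getD a PySem.Set.empty).all (fun b => S.any (fun c => attacks.contains (c, b)))
      if ok then PySem.Set.add dfd a else dfd) PySem.Set.empty
  defended

-- ===== PORT B =====
-- attacked_by_S = {v for (c,v) in attacks if c in S}
-- undefended = {a for (b,a) in attacks if b not in attacked_by_S}; return set(atoms) - undefended
def F_py_alt (atoms : List String) (attacks : List (String × String)) (S : List String) : List String :=
  let attackedByS : PySem.Set String :=
    attacks.foldl (fun s cv => if PySem.Set.contains (PySem.Set.ofList S) cv.1 then PySem.Set.add s cv.2 else s) PySem.Set.empty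
  let undefended : PySem.Set String :=
    attacks.foldl (fun s ba => if PySem.Set.contains attackedByS ba.1 then s else PySem.Set.add s ba.2) PySem.Set.empty
  PySem.Set.diff (PySem.Set.ofList atoms) undefended

-- ===== PRECONDITION & SPEC =====
def Spec_F_py (atoms : List String) (attacks : List (String × String)) (S : List String) (out : List String) : Prop := out = F_py_alt atoms attacks S
instance (atoms : List String) (attacks : List (String × String)) (S : List String) (out : List String) : Decidable (Spec_F_py atoms attacks S out) := by unfold Spec_F_py; infer_instance

-- ===== CLAIM (what is proved, stated in full; the proofs are below) =====
def Claim_equal_F_py : Prop := ∀ (atoms : List String) (attacks : List (String × String)) (S : List String), Dom_F_py atoms attacks S → Spec_F_py atoms attacks S (F_py atoms attacks S)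

-- ===== LEMMAS AND PROOFS =====

-- membership in a conditional set-building loop
theorem mem_foldl_add_if {α β : Type} [BEq α] [LawfulBEq α] (l : List β) (p : β → Bool) (f : β → α) (x : α) :
    ∀ s : PySem.Set α, x ∈ l.foldl (fun s e => if p e then PySem.Set.add s (f e) else s) s ↔ x ∈ s ∨ ∃ e ∈ l, p e = true ∧ x = f e := by
  induction l with
  | nil => simp
  | cons e l ih =>
    intro s
    simp only [List.foldl_cons, ih, List.mem_cons]
    by_cases hp : p e = true
    · simp only [hp, if_true, PySem.Set.mem_add]
      constructor
      · rintro ((h1 | h1) | ⟨e', he', hp', hx⟩)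
        · exact Or.inl h1
        · exact Or.inr ⟨e, Or.inl rfl, hp, h1⟩
        · exact Or.inr ⟨e', Or.inr he', hp', hx⟩
      · rintro (h1 | ⟨e', (he' | he'), hp', hx⟩)
        · exact Or.inl (Or.inl h1)
        · exact Or.inl (Or.inr (he' ▸ hx))
        · exact Or.inr ⟨e', he', hp', hx⟩
    · simp only [hp, if_false, Bool.false_eq_true]
      constructor
      · rintro (h1 | ⟨e', he', hp', hx⟩)
        · exact Or.inl h1
        · exact Or.inr ⟨e', Or.inr he', hp', hx⟩
      · rintro (h1 | ⟨e', (he' | he'), hp', hx⟩)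
        · exact Or.inl h1
        · exact absurd (he' ▸ hp') hp
        · exact Or.inr ⟨e', he', hp', hx⟩

-- pushing a set difference through the element-insertion loop of set(atoms)
theorem diff_foldl_add {α : Type} [BEq α] [LawfulBEq α] (u : PySem.Set α) :
    ∀ (l : List α) (s : PySem.Set α),
      PySem.Set.diff (l.foldl PySem.Set.add s) u
        = l.foldl (fun t a => if PySem.Set.contains u a then t else PySem.Set.add t a) (PySem.Set.diff s u) := by
  intro l
  induction l with
  | nil => intro s; rfl
  | cons a l ih =>
    intro s
    simp only [List.foldl_cons, ih]
    congr 1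
    rw [PySem.Set.add_eq_ite]
    by_cases hu : a ∈ u
    · have hcu : PySem.Set.contains u a = true := (PySem.Set.contains_iff u a).2 hu
      by_cases hs : a ∈ s
      · simp [hs, hu]
      · simp [hs, hu, PySem.Set.diff, List.filter_append]
    · have hcu : PySem.Set.contains u a = false := by
        cases h : PySem.Set.contains u a
        · rfl
        · exact absurd ((PySem.Set.contains_iff u a).1 h) hu
      by_cases hs : a ∈ s
      · simp [hs, hu]
      · have hdm : a ∉ PySem.Set.diff s u := fun h => hs ((PySem.Set.mem_diff s u a).1 h).1
        simp [hs, hu, PySem.Set.diff, List.filter_append]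

-- the initial dict {a: set() for a in atoms}: every value is the empty set
theorem getD_init_empty (atoms : List String) (a : String) :
    ∀ d : PySem.Dict String (PySem.Set String), (∀ k, d.getD k PySem.Set.empty = PySem.Set.empty) →
      (atoms.foldl (fun d a => d.insert a PySem.Set.empty) d).getD a PySem.Set.empty = PySem.Set.empty := by
  induction atoms with
  | nil => intro d h; exact h a
  | cons x atoms ih =>
    intro d h
    simp only [List.foldl_cons]
    refine ih _ (fun k => ?_)
    rw [PySem.Dict.getD_insert]
    split
    · rfl
    · exact h k

theorem contains_init (atoms : List String) (k : String) :
    (atoms.foldl (fun d a => d.insert a (PySem.Set.empty : PySem.Set String)) PySem.Dict.empty).contains k = true ↔ k ∈ atoms := by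
  rw [PySem.Dict.contains_iff_mem_keys, PySem.Dict.keys_foldl_insert]
  simp [PySem.Dict.keys_empty, PySem.Set.mem_update]

-- the attacker-index loop: b is recorded at key a iff a is a key and (b,a) is an attack
theorem mem_getD_atk (attacks : List (String × String)) (atoms : List String) (a b : String) :
    ∀ d : PySem.Dict String (PySem.Set String),
      (∀ k, d.contains k = true ↔ k ∈ atoms) →
      (b ∈ (attacks.foldl (fun d uv =>
          if d.contains uv.2 then d.modify uv.2 PySem.Set.empty (fun s => PySem.Set.add s uv.1) else d) d).getD a PySem.Set.empty
        ↔ b ∈ d.getD a PySem.Set.empty ∨ (a ∈ atoms ∧ (b, a) ∈ attacks)) := by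
  induction attacks with
  | nil => intro d h; simp
  | cons uv attacks ih =>
    obtain ⟨u, v⟩ := uv
    intro d h
    simp only [List.foldl_cons, List.mem_cons]
    by_cases hc : d.contains v = true
    · have hinv : ∀ k, (d.modify v PySem.Set.empty (fun s => PySem.Set.add s u)).contains k = true ↔ k ∈ atoms := by
        intro k
        rw [PySem.Dict.contains_modify]
        constructor
        · intro hk
          rw [Bool.or_eq_true] at hk
          rcases hk with h1 | h2
          · exact (beq_iff_eq.1 h1) ▸ (h v).1 hc
          · exact (h k).1 h2
        · intro hk
          rw [Bool.or_eq_true]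
          exact Or.inr ((h k).2 hk)
      rw [if_pos hc, ih _ hinv, PySem.Dict.getD_modify]
      by_cases ha : a = v
      · subst ha
        rw [if_pos rfl, PySem.Set.mem_add]
        constructor
        · rintro (⟨h1 | h1⟩ | h2)
          · exact Or.inl h1
          · exact Or.inr ⟨(h a).1 hc, Or.inl (by rw [h1])⟩
          · exact Or.inr ⟨h2.1, Or.inr h2.2⟩
        · rintro (h1 | ⟨h2, h3 | h3⟩)
          · exact Or.inl (Or.inl h1)
          · exact Or.inl (Or.inr (Prod.ext_iff.1 h3).1)
          · exact Or.inr ⟨h2, h3⟩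
      · rw [if_neg ha]
        constructor
        · rintro (h1 | ⟨h2, h3⟩)
          · exact Or.inl h1
          · exact Or.inr ⟨h2, Or.inr h3⟩
        · rintro (h1 | ⟨h2, h3 | h3⟩)
          · exact Or.inl h1
          · exact absurd (Prod.ext_iff.1 h3).2 ha
          · exact Or.inr ⟨h2, h3⟩
    · rw [if_neg hc, ih _ h]
      constructor
      · rintro (h1 | ⟨h2, h3⟩)
        · exact Or.inl h1
        · exact Or.inr ⟨h2, Or.inr h3⟩
      · rintro (h1 | ⟨h2, h3 | h3⟩)
        · exact Or.inl h1
        · cases h3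
          exact absurd ((h a).2 h2) (by simpa using hc)
        · exact Or.inr ⟨h2, h3⟩

theorem F_py_eq (atoms : List String) (attacks : List (String × String)) (S : List String) :
    F_py atoms attacks S = F_py_alt atoms attacks S := by
  unfold F_py F_py_alt
  -- characterize B's two edge-pass sets
  have hABS : ∀ b : String,
      (b ∈ attacks.foldl (fun s cv => if PySem.Set.contains (PySem.Set.ofList S) cv.1 then PySem.Set.add s cv.2 else s) PySem.Set.empty
        ↔ ∃ cv ∈ attacks, cv.1 ∈ S ∧ cv.2 = b) := by
    intro b
    rw [show (fun (s : PySem.Set String) (cv : String × String) => if PySem.Set.contains (PySem.Set.ofList S) cv.1 then PySem.Set.add s cv.2 else s)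
        = (fun s cv => if (fun cv : String × String => PySem.Set.contains (PySem.Set.ofList S) cv.1) cv then PySem.Set.add s ((fun cv : String × String => cv.2) cv) else s) from rfl]
    rw [mem_foldl_add_if]
    simp only [PySem.Set.empty, List.not_mem_nil, false_or]
    constructor
    · rintro ⟨e, he, hp, hb⟩
      exact ⟨e, he, (PySem.Set.mem_ofList _ _).1 ((PySem.Set.contains_iff _ _).1 hp), hb.symm⟩
    · rintro ⟨e, he, hp, hb⟩
      exact ⟨e, he, (PySem.Set.contains_iff _ _).2 ((PySem.Set.mem_ofList _ _).2 hp), hb.symm⟩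
  set ABS := attacks.foldl (fun s cv => if PySem.Set.contains (PySem.Set.ofList S) cv.1 then PySem.Set.add s cv.2 else s) PySem.Set.empty with hABSdef
  have hU : ∀ a : String,
      (a ∈ attacks.foldl (fun s ba => if PySem.Set.contains ABS ba.1 then s else PySem.Set.add s ba.2) PySem.Set.empty
        ↔ ∃ ba ∈ attacks, (ba.1 ∉ ABS) ∧ ba.2 = a) := by
    intro a
    rw [show (fun (s : PySem.Set String) (ba : String × String) => if PySem.Set.contains ABS ba.1 then s else PySem.Set.add s ba.2)
        = (fun s ba => if (fun ba : String × String => !PySem.Set.contains ABS ba.1) ba then PySem.Set.add s ((fun ba : String × String => ba.2) ba) else s) from by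
          funext s ba
          cases h : PySem.Set.contains ABS ba.1
          · simp only [h]
            simp
          · simp only [h]
            simp]
    rw [mem_foldl_add_if]
    simp only [PySem.Set.empty, List.not_mem_nil, false_or, Bool.not_eq_true']
    constructor
    · rintro ⟨e, he, hp, hb⟩
      exact ⟨e, he, fun hm => by rw [(PySem.Set.contains_iff _ _).2 hm] at hp; exact Bool.true_eq_false.mp hp, hb.symm⟩
    · rintro ⟨e, he, hp, hb⟩
      refine ⟨e, he, ?_, hb.symm⟩
      cases h : PySem.Set.contains ABS e.1
      · rfl
      · exact absurd ((PySem.Set.contains_iff _ _).1 h) hp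
  set U := attacks.foldl (fun s ba => if PySem.Set.contains ABS ba.1 then s else PySem.Set.add s ba.2) PySem.Set.empty with hUdef
  -- the per-atom condition of A agrees with ∉ U on atoms
  have hatk : ∀ a b : String,
      (b ∈ (attacks.foldl (fun d uv =>
          if d.contains uv.2 then d.modify uv.2 PySem.Set.empty (fun s => PySem.Set.add s uv.1) else d)
          (atoms.foldl (fun d a => d.insert a PySem.Set.empty) PySem.Dict.empty)).getD a PySem.Set.empty
        ↔ a ∈ atoms ∧ (b, a) ∈ attacks) := by
    intro a b
    rw [mem_getD_atk attacks atoms a b _ (contains_init atoms)]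
    rw [getD_init_empty atoms a PySem.Dict.empty (fun k => PySem.Dict.getD_empty _ _)]
    simp [PySem.Set.empty]
  have hcond : ∀ a ∈ atoms,
      ((attacks.foldl (fun d uv =>
          if d.contains uv.2 then d.modify uv.2 PySem.Set.empty (fun s => PySem.Set.add s uv.1) else d)
          (atoms.foldl (fun d a => d.insert a PySem.Set.empty) PySem.Dict.empty)).getD a PySem.Set.empty).all
            (fun b => S.any (fun c => attacks.contains (c, b)))
        = !(PySem.Set.contains U a) := by
    intro a ha
    by_cases hu : a ∈ U
    · rw [(PySem.Set.contains_iff U a).2 hu]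
      obtain ⟨ba, hba, hnabs, hba2⟩ := (hU a).1 hu
      simp only [Bool.not_true]
      rw [List.all_eq_false]
      refine ⟨ba.1, (hatk a ba.1).2 ⟨ha, by rw [← hba2]; exact hba⟩, ?_⟩
      rw [Bool.not_eq_true, List.any_eq_false]
      intro c hc
      simp only [List.contains_eq_mem]
      intro hmem
      exact hnabs ((hABS ba.1).2 ⟨(c, ba.1), of_decide_eq_true hmem, hc, rfl⟩)
    · have hcu : PySem.Set.contains U a = false := by
        cases h : PySem.Set.contains U a
        · rfl
        · exact absurd ((PySem.Set.contains_iff U a).1 h) hu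
      rw [hcu]
      simp only [Bool.not_false]
      rw [List.all_eq_true]
      intro b hb
      obtain ⟨-, hatt⟩ := (hatk a b).1 hb
      have habs : b ∈ ABS := by
        by_contra hn
        exact hu ((hU a).2 ⟨(b, a), hatt, hn, rfl⟩)
      obtain ⟨cv, hcv, hc1, hc2⟩ := (hABS b).1 habs
      rw [List.any_eq_true]
      exact ⟨cv.1, hc1, by simp only [List.contains_eq_mem, decide_eq_true_eq]; rw [show (cv.1, b) = cv from by rw [← hc2]] ; exact hcv⟩
  -- replace A's condition pointwise, then push the difference through set(atoms)
  rw [PySem.Set.ofList_eq_foldl, diff_foldl_add]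
  show atoms.foldl _ PySem.Set.empty = atoms.foldl _ (PySem.Set.diff PySem.Set.empty U)
  rw [show PySem.Set.diff PySem.Set.empty U = PySem.Set.empty from rfl]
  apply PySem.List.foldl_congr_mem
  intro dfd a ha
  rw [hcond a ha]
  cases h : PySem.Set.contains U a
  · simp
  · simp

-- ===== VERDICT (by name: the statement is the Claim_ definition above) =====
theorem F_py_spec : Claim_equal_F_py := by
  intro atoms attacks S _
  unfold Spec_F_py
  exact F_py_eq atoms attacks S
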